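-- pv_equiv track=rewrite | github.com/kondanta/study-lib | Taylan/Crypt/python/crpt.py | ReverseRightLeftNibble
-- ===== SOURCE A (Python) =====
-- def ReverseRightLeftNibble(leftnibble, rightnibble):
--     """
--     When I was creating left and right nibbles, I seperate them by their index positions.
--     So I need to fix them by their index positions again.
--     """
--     revArr = []
--     counter = 0
--     counterl = 0
--     counterr = 0
--     while counter < 10:
--         if counter % 2 == 0:
--             revArr.append(rightnibble[counterr])
--             counter += 1
--             counterr += 1
--         else:
--             revArr.append(leftnibble[counterl])
--             counter += 1
--             counterl += 1
--     return revArr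
-- ===== SOURCE B (Python) =====
-- def ReverseRightLeftNibble(leftnibble, rightnibble):
--     """
--     When I was creating left and right nibbles, I seperate them by their index positions.
--     So I need to fix them by their index positions again.
--     """
--     revArr = [None] * 10
--     revArr[0::2] = rightnibble[:5]
--     revArr[1::2] = leftnibble[:5]
--     return revArr
-- ===== Notes on version B (the rewrite author's own statement) =====
-- stated objective: alternative
-- what changed: Replaces the 10-step parity-branch interleaving loop with three counters by positional placement: preallocate a 10-slot list and write rightnibble[:5] into the even positions and leftnibble[:5] into the odd positions with extended-slice assignment, no interleaving traversal at all.
import Mathlib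
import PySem

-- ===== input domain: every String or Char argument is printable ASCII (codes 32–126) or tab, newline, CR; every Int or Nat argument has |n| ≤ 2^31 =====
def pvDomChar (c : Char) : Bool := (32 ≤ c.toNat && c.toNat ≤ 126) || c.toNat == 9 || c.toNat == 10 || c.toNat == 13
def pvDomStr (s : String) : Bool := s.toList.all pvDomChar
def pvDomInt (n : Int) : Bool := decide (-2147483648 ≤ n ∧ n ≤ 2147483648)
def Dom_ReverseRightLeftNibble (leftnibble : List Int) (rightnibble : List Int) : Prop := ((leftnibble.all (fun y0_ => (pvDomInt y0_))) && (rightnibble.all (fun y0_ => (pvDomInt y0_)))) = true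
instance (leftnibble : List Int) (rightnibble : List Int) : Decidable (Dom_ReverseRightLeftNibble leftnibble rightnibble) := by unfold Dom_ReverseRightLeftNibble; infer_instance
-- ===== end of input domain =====

-- B replaces A's 10-step parity-branch interleaving loop (three counters) by positional
-- placement: a preallocated 10-slot list whose even slots get rightnibble[:5] and odd slots
-- get leftnibble[:5] via extended-slice assignment (alternative decomposition, same cost).

-- ===== PORT A =====
-- A's while loop: counter, counterl, counterr; indexing is pyGetD (Pre_ guarantees the
-- indices are in range, exactly where Python's xs[i] returns).
def loopA (leftnibble rightnibble : List Int) (counter counterl counterr : Nat)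
    (revArr : List Int) : List Int :=
  if counter < 10 then
    if counter % 2 == 0 then
      loopA leftnibble rightnibble (counter + 1) counterl (counterr + 1)
        (revArr ++ [PySem.List.pyGetD rightnibble (counterr : Int) 0])
    else
      loopA leftnibble rightnibble (counter + 1) (counterl + 1) counterr
        (revArr ++ [PySem.List.pyGetD leftnibble (counterl : Int) 0])
  else revArr
termination_by 10 - counter
decreasing_by all_goals omega

def ReverseRightLeftNibble (leftnibble : List Int) (rightnibble : List Int) : List Int :=
  loopA leftnibble rightnibble 0 0 0 []

-- ===== PORT B =====
-- Python's extended-slice assignment res[start::2] = vals: write vals[i] at position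
-- start + 2*i for each i (Pre_ guarantees vals has exactly the slice's 5 slots).
def setStride2 (res : List Int) (start : Nat) (vals : List Int) : List Int :=
  (vals.zipIdx).foldl (fun r vi => r.set (start + 2 * vi.2) vi.1) res

-- [None] * 10 is a placeholder list fully overwritten under Pre_; 0 stands in for None.
def ReverseRightLeftNibble_alt (leftnibble : List Int) (rightnibble : List Int) : List Int :=
  let revArr := List.replicate 10 0
  let revArr := setStride2 revArr 0 (PySem.List.slice rightnibble none (some 5))
  let revArr := setStride2 revArr 1 (PySem.List.slice leftnibble none (some 5))
  revArr

-- ===== PRECONDITION & SPEC =====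
-- Pre_: exactly the inputs on which A's five indexed reads from each list never raise.
def Pre_ReverseRightLeftNibble (leftnibble : List Int) (rightnibble : List Int) : Prop :=
  5 ≤ leftnibble.length ∧ 5 ≤ rightnibble.length
instance (leftnibble : List Int) (rightnibble : List Int) : Decidable (Pre_ReverseRightLeftNibble leftnibble rightnibble) := by unfold Pre_ReverseRightLeftNibble; infer_instance

def pvWitness_ReverseRightLeftNibble : List Int × List Int := ([1,2,3,4,5], [6,7,8,9,10])

def Spec_ReverseRightLeftNibble (leftnibble : List Int) (rightnibble : List Int) (out : List Int) : Prop := out = ReverseRightLeftNibble_alt leftnibble rightnibble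
instance (leftnibble : List Int) (rightnibble : List Int) (out : List Int) : Decidable (Spec_ReverseRightLeftNibble leftnibble rightnibble out) := by unfold Spec_ReverseRightLeftNibble; infer_instance

-- ===== CLAIM =====
def Claim_equal_ReverseRightLeftNibble : Prop := ∀ (leftnibble : List Int) (rightnibble : List Int), Dom_ReverseRightLeftNibble leftnibble rightnibble → Pre_ReverseRightLeftNibble leftnibble rightnibble → Spec_ReverseRightLeftNibble leftnibble rightnibble (ReverseRightLeftNibble leftnibble rightnibble)

-- ===== LEMMAS AND PROOFS =====

-- ===== VERDICT =====
theorem ReverseRightLeftNibble_spec : Claim_equal_ReverseRightLeftNibble := by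
  intro l r _ hpre
  obtain ⟨hl, hr⟩ := hpre
  obtain ⟨l0, l', hl'⟩ : ∃ a t, l = a :: t := by cases l with | nil => simp at hl | cons a t => exact ⟨a, t, rfl⟩
  subst hl'; simp at hl
  obtain ⟨l1, l', hl'⟩ : ∃ a t, l' = a :: t := by cases l' with | nil => simp at hl | cons a t => exact ⟨a, t, rfl⟩
  subst hl'; simp at hl
  obtain ⟨l2, l', hl'⟩ : ∃ a t, l' = a :: t := by cases l' with | nil => simp at hl | cons a t => exact ⟨a, t, rfl⟩
  subst hl'; simp at hl
  obtain ⟨l3, l', hl'⟩ : ∃ a t, l' = a :: t := by cases l' with | nil => simp at hl | cons a t => exact ⟨a, t, rfl⟩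
  subst hl'; simp at hl
  obtain ⟨l4, l', hl'⟩ : ∃ a t, l' = a :: t := by cases l' with | nil => simp at hl | cons a t => exact ⟨a, t, rfl⟩
  subst hl'
  obtain ⟨r0, r', hr'⟩ : ∃ a t, r = a :: t := by cases r with | nil => simp at hr | cons a t => exact ⟨a, t, rfl⟩
  subst hr'; simp at hr
  obtain ⟨r1, r', hr'⟩ : ∃ a t, r' = a :: t := by cases r' with | nil => simp at hr | cons a t => exact ⟨a, t, rfl⟩
  subst hr'; simp at hr
  obtain ⟨r2, r', hr'⟩ : ∃ a t, r' = a :: t := by cases r' with | nil => simp at hr | cons a t => exact ⟨a, t, rfl⟩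
  subst hr'; simp at hr
  obtain ⟨r3, r', hr'⟩ : ∃ a t, r' = a :: t := by cases r' with | nil => simp at hr | cons a t => exact ⟨a, t, rfl⟩
  subst hr'; simp at hr
  obtain ⟨r4, r', hr'⟩ : ∃ a t, r' = a :: t := by cases r' with | nil => simp at hr | cons a t => exact ⟨a, t, rfl⟩
  subst hr'
  show ReverseRightLeftNibble _ _ = ReverseRightLeftNibble_alt _ _
  simp [ReverseRightLeftNibble, ReverseRightLeftNibble_alt, loopA, setStride2,
    PySem.List.pyGetD_ofNat', PySem.List.slice_to, List.replicate, List.zipIdx, List.set]
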